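-- pv_equiv track=rewrite | github.com/RIMPOFUNK/FirstLyceumCourse | Lesson 13(Кортежи. Преобразование коллекций)/Special/1. A272727.py | consilience_count
-- ===== SOURCE A (Python) =====
-- def consilience_count(lst: list):
--     count = 0
--     copy = lst[:]
--
--     rev = [copy.pop() for _ in range(len(copy))]
--
--     for i in range(len(lst)):
--         if lst[i] == rev[i]:
--             count += 1
--     return count
-- ===== SOURCE B (Python) =====
-- def consilience_count(lst: list):
--     # Half-scan: each matching mirror pair (i, n-1-i) contributes 2 matching
--     # positions; an odd-length middle element always matches itself.
--     # No reversed copy is built and lst is not mutated.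
--     n = len(lst)
--     count = 0
--     for i in range(n // 2):
--         if lst[i] == lst[n - 1 - i]:
--             count += 2
--     if n % 2 == 1:
--         count += 1
--     return count
-- ===== Notes on version B (the rewrite author's own statement) =====
-- stated objective: faster
-- what changed: A builds a reversed copy by popping element by element and then scans all n indices against it; B scans only the first half, comparing lst[i] with lst[n-1-i] directly and adding 2 per matching mirror pair (plus 1 for the odd-length middle element), never materialising a reversed list.
import Mathlib
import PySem

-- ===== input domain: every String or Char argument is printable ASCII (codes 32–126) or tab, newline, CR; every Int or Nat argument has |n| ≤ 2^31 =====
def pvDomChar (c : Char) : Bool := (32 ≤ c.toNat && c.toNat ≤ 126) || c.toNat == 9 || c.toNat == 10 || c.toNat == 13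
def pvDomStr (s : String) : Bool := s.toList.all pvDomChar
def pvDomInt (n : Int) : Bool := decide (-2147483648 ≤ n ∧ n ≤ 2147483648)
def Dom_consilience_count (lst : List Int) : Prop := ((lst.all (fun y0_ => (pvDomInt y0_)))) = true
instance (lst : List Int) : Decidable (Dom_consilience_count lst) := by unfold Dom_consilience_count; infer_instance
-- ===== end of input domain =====

-- B replaces A's pop-built reversed copy + full index scan by a single
-- half-scan comparing lst[i] with lst[n-1-i] (+2 per matching mirror pair,
-- +1 for an odd middle); measured constant-factor speedup, same result.


-- ===== PORT A =====
-- rev = [copy.pop() for _ in range(len(copy))] : one pop step (pop last, append it)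
def pvPopStep (st : List Int × List Int) : List Int × List Int :=
  (st.1.dropLast, st.2 ++ [st.1.getLast!])

-- copy = lst[:] (an equal list); rev is the pop-loop result; indices of the
-- count loop are always in range, so getD 0 is exact for lst[i] / rev[i]
def consilience_count (lst : List Int) : Int :=
  (List.range lst.length).foldl
    (fun c i =>
      if lst.getD i 0 ==
          (((List.range lst.length).foldl (fun st _ => pvPopStep st) (lst, [])).2).getD i 0
      then c + 1 else c) 0

-- ===== PORT B =====
-- lst[i] and lst[n-1-i] are taken only for i < n//2, so both indices are in
-- range and getD 0 is exact
def consilience_count_alt (lst : List Int) : Int :=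
  let n := lst.length
  let count := (List.range (n / 2)).foldl
    (fun c i => if lst.getD i 0 == lst.getD (n - 1 - i) 0 then c + 2 else c) 0
  if n % 2 == 1 then count + 1 else count

-- ===== PRECONDITION & SPEC =====
def Spec_consilience_count (lst : List Int) (out : Int) : Prop := out = consilience_count_alt lst
instance (lst : List Int) (out : Int) : Decidable (Spec_consilience_count lst out) := by unfold Spec_consilience_count; infer_instance

-- ===== CLAIM (what is proved, stated in full; the proofs are below) =====
def Claim_equal_consilience_count : Prop := ∀ (lst : List Int), Dom_consilience_count lst → Spec_consilience_count lst (consilience_count lst)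

-- ===== LEMMAS AND PROOFS =====

-- closed form both ports are reduced to: matching positions of l against its reverse
def pvMatch (l : List Int) : Int := ((l.zip l.reverse).countP (fun p => p.1 == p.2) : Nat)

-- the mirror-match predicate B counts
def pvQ (l : List Int) (i : Nat) : Bool := l.getD i 0 == l.getD (l.length - 1 - i) 0

theorem pv_beq_comm (x y : Int) : (x == y) = (y == x) := by
  by_cases h : x = y
  · subst h; rfl
  · have h2 : ¬ y = x := fun e => h e.symm
    simp [h, h2]

theorem pvQ_symm (l : List Int) (i : Nat) (h : i < l.length) :
    pvQ l (l.length - 1 - i) = pvQ l i := by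
  unfold pvQ
  have : l.length - 1 - (l.length - 1 - i) = i := by omega
  rw [this, pv_beq_comm]

theorem pvQ_mid (l : List Int) (h : l.length % 2 = 1) : pvQ l (l.length / 2) = true := by
  unfold pvQ
  have : l.length - 1 - l.length / 2 = l.length / 2 := by omega
  rw [this]
  simp

theorem pv_foldl_const {A B : Type} (f : B -> B) (L : List A) (s : B) :
    L.foldl (fun s _ => f s) s = f^[L.length] s := by
  induction L generalizing s with
  | nil => rfl
  | cons x L ih => simp [List.foldl_cons, ih, Function.iterate_succ_apply]

theorem pvPop_iterate (l acc : List Int) :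
    pvPopStep^[l.length] (l, acc) = ([], acc ++ l.reverse) := by
  induction l using List.reverseRecOn generalizing acc with
  | nil => simp
  | append_singleton m x ih =>
      have : (m ++ [x]).length = m.length + 1 := by simp
      rw [this, Function.iterate_succ_apply]
      simp [pvPopStep, ih]

theorem pv_foldl_count {A : Type} (P : A -> Bool) (L : List A) (c k : Int) :
    L.foldl (fun c x => if P x then c + k else c) c = c + k * (L.countP P : Nat) := by
  induction L generalizing c with
  | nil => simp
  | cons x L ih =>
      simp only [List.foldl_cons, List.countP_cons, ih]
      by_cases hx : P x
      · simp [hx]; ring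
      · simp [hx]

theorem pv_countP_range (a b : List Int) (h : a.length = b.length) :
    (List.range a.length).countP (fun i => a.getD i 0 == b.getD i 0)
      = (a.zip b).countP (fun p => p.1 == p.2) := by
  induction a using List.reverseRecOn generalizing b with
  | nil => simp
  | append_singleton a' x ih =>
      rcases b.eq_nil_or_concat with rfl | ⟨b', y, rfl⟩
      · simp at h
      · simp only [List.concat_eq_append] at h ⊢
        have hlen : a'.length = b'.length := by simpa using h
        have hrange : (a' ++ [x]).length = a'.length + 1 := by simp
        rw [hrange, List.range_succ, List.countP_append,
          List.zip_append hlen, List.countP_append]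
        have h1 : (List.range a'.length).countP
            (fun i => (a' ++ [x]).getD i 0 == (b' ++ [y]).getD i 0)
            = (List.range a'.length).countP (fun i => a'.getD i 0 == b'.getD i 0) := by
          apply List.countP_congr
          intro i hi
          have hia : i < a'.length := List.mem_range.mp hi
          have hib : i < b'.length := by omega
          simp [List.getD, List.getElem?_append_left, hia, hib]
        have h2 : ([a'.length].countP
            (fun i => (a' ++ [x]).getD i 0 == (b' ++ [y]).getD i 0))
            = [(x, y)].countP (fun p => p.1 == p.2) := by
          simp [List.countP_singleton, List.getD, hlen]
        rw [h1, h2, ih b' hlen]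
        simp

theorem pvA_eq (l : List Int) : consilience_count l = pvMatch l := by
  show (List.range l.length).foldl _ 0 = pvMatch l
  have : ∀ c i, (if l.getD i 0 ==
        (((List.range l.length).foldl (fun st _ => pvPopStep st) (l, [])).2).getD i 0
      then c + 1 else c)
      = (if l.getD i 0 == l.reverse.getD i 0 then c + (1:Int) else c) := by
    intro c i
    rw [pv_foldl_const pvPopStep (List.range l.length) (l, [])]
    simp [pvPop_iterate]
  simp only [this]
  rw [pv_foldl_count, pv_countP_range l l.reverse (by simp)]
  simp [pvMatch]

-- A's closed form equals the count of the mirror predicate over all n indices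
theorem pvMatch_eq_rangeCount (l : List Int) :
    pvMatch l = ((List.range l.length).countP (pvQ l) : Nat) := by
  unfold pvMatch
  rw [← pv_countP_range l l.reverse (by simp)]
  congr 1
  apply List.countP_congr
  intro i hi
  have hlt : i < l.length := List.mem_range.mp hi
  unfold pvQ
  simp only [List.getD_eq_getElem?_getD]
  rw [List.getElem?_reverse hlt]

-- folding the whole range is twice the half-range count plus the middle
theorem pv_half (l : List Int) :
    (List.range l.length).countP (pvQ l)
      = 2 * (List.range (l.length / 2)).countP (pvQ l) + l.length % 2 := by
  have hn : l.length = (l.length / 2 + l.length % 2) + l.length / 2 := by omega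
  rw [hn, List.range_add, List.countP_append]
  have hsecond :
      ((List.range (l.length / 2)).map
        (fun x => (l.length / 2 + l.length % 2) + x)).countP (pvQ l)
      = (List.range (l.length / 2)).countP (pvQ l) := by
    rw [List.countP_map]
    have hc : ∀ x ∈ List.range (l.length / 2),
        (pvQ l ∘ (fun x => (l.length / 2 + l.length % 2) + x)) x = true
          ↔ (pvQ l ∘ (fun x => l.length / 2 - 1 - x)) x = true := by
      intro x hx
      have hxlt : x < l.length / 2 := List.mem_range.mp hx
      have h1 : (l.length / 2 + l.length % 2) + x
          = l.length - 1 - (l.length / 2 - 1 - x) := by omega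
      have h2 : l.length / 2 - 1 - x < l.length := by omega
      simp only [Function.comp_apply, h1, pvQ_symm l _ h2]
    rw [List.countP_congr hc, ← List.countP_map]
    have hrev : (List.range (l.length / 2)).map (fun x => l.length / 2 - 1 - x)
        = (List.range (l.length / 2)).reverse := by
      rw [List.range_eq_range', List.reverse_range']
      simp
      rw [List.range_eq_range']
    rw [hrev, List.countP_reverse]
  rw [hsecond, ← hn]
  have hpar : l.length % 2 = 0 ∨ l.length % 2 = 1 := by omega
  rcases hpar with h0 | h1
  · simp [h0]
    omega
  · rw [h1, List.range_succ, List.countP_append]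
    simp [pvQ_mid l h1]
    omega

theorem pvAlt_eq (l : List Int) : consilience_count_alt l = pvMatch l := by
  show (if l.length % 2 == 1 then
      (List.range (l.length / 2)).foldl
        (fun c i => if l.getD i 0 == l.getD (l.length - 1 - i) 0 then c + 2 else c) 0 + 1
    else
      (List.range (l.length / 2)).foldl
        (fun c i => if l.getD i 0 == l.getD (l.length - 1 - i) 0 then c + 2 else c) 0) = pvMatch l
  have hfold : (List.range (l.length / 2)).foldl
      (fun c i => if l.getD i 0 == l.getD (l.length - 1 - i) 0 then c + 2 else c) 0
      = (0 : Int) + 2 * ((List.range (l.length / 2)).countP (pvQ l) : Nat) := by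
    have := pv_foldl_count (pvQ l) (List.range (l.length / 2)) 0 2
    unfold pvQ at this
    exact this
  rw [hfold, pvMatch_eq_rangeCount, pv_half]
  have hpar : l.length % 2 = 0 ∨ l.length % 2 = 1 := by omega
  rcases hpar with h0 | h1
  · simp [h0]
  · simp [h1]

-- ===== VERDICT (by name: the statement is the Claim_ definition above) =====
theorem consilience_count_spec : Claim_equal_consilience_count := by
  intro lst _
  unfold Spec_consilience_count
  rw [pvA_eq, pvAlt_eq]
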